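-- pv_equiv track=rewrite | github.com/rsms/hophop | tools/gen_diagnostics.py | to_printf_fmt
-- ===== SOURCE A (Python) =====
-- def to_printf_fmt(message: str) -> tuple[str, int]:
--     out: list[str] = []
--     i = 0
--     arg_count = 0
--     while i < len(message):
--         if message.startswith("{s}", i):
--             out.append("%s")
--             arg_count += 1
--             i += 3
--             continue
--         if message[i] == "%":
--             out.append("%%")
--         else:
--             out.append(message[i])
--         i += 1
--     return ("".join(out), arg_count)
-- ===== SOURCE B (Python) =====
-- def to_printf_fmt(message: str) -> tuple[str, int]:
--     parts = message.split("{s}")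
--     return ("%s".join(p.replace("%", "%%") for p in parts), len(parts) - 1)
-- ===== Notes on version B (the rewrite author's own statement) =====
-- stated objective: simpler
-- what changed: Replaces A's index-driven character-by-character while-loop (a startswith check at every position, one append per character) by a three-step split/escape/join over whole segments: split the message on the placeholder, escape percent characters in each segment with replace, rejoin the segments with the printf specifier; the argument count is the number of segments minus one.
import Mathlib
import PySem

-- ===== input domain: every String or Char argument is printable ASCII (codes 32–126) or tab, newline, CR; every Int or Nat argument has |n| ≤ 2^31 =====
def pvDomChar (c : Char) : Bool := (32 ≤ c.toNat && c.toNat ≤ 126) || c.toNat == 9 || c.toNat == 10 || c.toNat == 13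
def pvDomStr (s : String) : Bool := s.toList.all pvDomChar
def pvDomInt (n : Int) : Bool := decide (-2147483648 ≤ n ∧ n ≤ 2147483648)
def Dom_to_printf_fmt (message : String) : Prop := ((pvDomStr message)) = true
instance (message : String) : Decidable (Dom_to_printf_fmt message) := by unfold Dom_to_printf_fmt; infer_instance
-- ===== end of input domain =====

-- B replaces A's index-driven character-by-character scan by split-on-"{s}" / escape each segment / join with "%s" (simpler decomposition).

-- ===== PORT A =====
-- A's while loop, transliterated: the index i becomes the remaining character list;
-- message.startswith("{s}", i) becomes isPrefixOf on the remainder.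
def pvLoopA (l : List Char) (out : List String) (n : Int) : List String × Int :=
  match l with
  | [] => (out, n)
  | c :: rest =>
      if "{s}".toList.isPrefixOf (c :: rest) then
        pvLoopA (rest.drop 2) (out ++ ["%s"]) (n + 1)
      else
        pvLoopA rest (out ++ [if c = '%' then "%%" else String.ofList [c]]) n
termination_by l.length
decreasing_by all_goals (simp only [List.length_cons, List.length_drop]; omega)

def to_printf_fmt (message : String) : String × Int :=
  let r := pvLoopA message.toList [] 0
  (PySem.Str.join "" r.1, r.2)

-- ===== PORT B =====
def to_printf_fmt_alt (message : String) : String × Int :=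
  let parts := PySem.Chars.splitOn message.toList "{s}".toList
  (String.ofList (PySem.Chars.join "%s".toList
      (parts.map (fun p => PySem.Chars.replace p "%".toList "%%".toList))),
   (parts.length : Int) - 1)

-- ===== PRECONDITION & SPEC =====
def Spec_to_printf_fmt (message : String) (out : String × Int) : Prop := out = to_printf_fmt_alt message
instance (message : String) (out : String × Int) : Decidable (Spec_to_printf_fmt message out) := by unfold Spec_to_printf_fmt; infer_instance

-- ===== CLAIM (what is proved, stated in full; the proofs are below) =====
def Claim_equal_to_printf_fmt : Prop := ∀ (message : String), Dom_to_printf_fmt message → Spec_to_printf_fmt message (to_printf_fmt message)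

-- ===== LEMMAS AND PROOFS =====

-- direct (non-accumulator) form of A's scan
def pvFA (l : List Char) : List String × Int :=
  match l with
  | [] => ([], 0)
  | c :: rest =>
      if "{s}".toList.isPrefixOf (c :: rest) then
        let r := pvFA (rest.drop 2); ("%s" :: r.1, r.2 + 1)
      else
        let r := pvFA rest; ((if c = '%' then "%%" else String.ofList [c]) :: r.1, r.2)
termination_by l.length
decreasing_by all_goals (simp only [List.length_cons, List.length_drop]; omega)

def pvConsHead (x : List Char) : List (List Char) → List (List Char)
  | p :: ps => (x ++ p) :: ps
  | [] => [x]

-- reference split on "{s}"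
def pvSplit (l : List Char) : List (List Char) :=
  match l with
  | [] => [[]]
  | c :: rest =>
      if "{s}".toList.isPrefixOf (c :: rest) then
        [] :: pvSplit (rest.drop 2)
      else
        pvConsHead [c] (pvSplit rest)
termination_by l.length
decreasing_by all_goals (simp only [List.length_cons, List.length_drop]; omega)

-- reference % escaping
def pvRepl : List Char → List Char
  | [] => []
  | c :: rest => (if c = '%' then ['%', '%'] else [c]) ++ pvRepl rest

theorem pvSplit_ne_nil (l : List Char) : pvSplit l ≠ [] := by
  induction l using pvSplit.induct with
  | case1 => simp [pvSplit]
  | case2 c rest h ih => rw [pvSplit, if_pos h]; simp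
  | case3 c rest h ih =>
    rw [pvSplit, if_neg h]
    cases hms : pvSplit rest with
    | nil => exact absurd hms ih
    | cons p ps => simp [pvConsHead]

theorem pvLoopA_eq (l : List Char) : ∀ (out : List String) (n : Int),
    pvLoopA l out n = (out ++ (pvFA l).1, n + (pvFA l).2) := by
  induction l using pvFA.induct with
  | case1 => intro out n; simp [pvLoopA, pvFA]
  | case2 c rest h ih =>
    intro out n
    rw [pvLoopA, if_pos h, ih, pvFA, if_pos h]
    simp
    ring
  | case3 c rest h ih =>
    intro out n
    rw [pvLoopA, if_neg h, ih, pvFA, if_neg h]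
    simp

theorem pvSplitOn_go_eq :
    ∀ (fuel : Nat) (l cur : List Char) (acc : List (List Char)), l.length < fuel →
    PySem.Chars.splitOn.go "{s}".toList fuel l cur acc
      = acc.reverse ++ pvConsHead cur.reverse (pvSplit l) := by
  intro fuel
  induction fuel with
  | zero => intro l cur acc h; omega
  | succ fuel ih =>
    intro l cur acc h
    match l with
    | [] => simp [PySem.Chars.splitOn.go, pvSplit, pvConsHead]
    | c :: rest =>
      rw [PySem.Chars.splitOn.go]
      by_cases hp : ("{s}".toList).isPrefixOf (c :: rest) = true
      · rw [if_pos hp]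
        have hlen : 2 ≤ rest.length := by
          obtain ⟨t, ht⟩ := List.isPrefixOf_iff_prefix.mp hp
          have := congrArg List.length ht
          simp at this
          omega
        rw [ih]
        · rw [pvSplit, if_pos hp]
          show _ = acc.reverse ++ (cur.reverse ++ []) :: pvSplit (rest.drop 2)
          simp only [show ("{s}".toList).length = 3 from rfl, List.drop_succ_cons]
          cases hms : pvSplit (rest.drop 2) with
          | nil => exact absurd hms (pvSplit_ne_nil _)
          | cons p ps => simp [pvConsHead]
        · simp at h ⊢; omega
      · rw [if_neg hp]
        rw [ih]
        · rw [pvSplit, if_neg hp]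
          cases hms : pvSplit rest with
          | nil => exact absurd hms (pvSplit_ne_nil _)
          | cons p ps => simp [pvConsHead]
        · simp at h ⊢; omega

theorem pvReplace_go_eq :
    ∀ (fuel : Nat) (l acc : List Char), l.length ≤ fuel →
    PySem.Chars.replace.go "%".toList "%%".toList fuel l acc
      = acc.reverse ++ pvRepl l := by
  intro fuel
  induction fuel with
  | zero =>
    intro l acc h
    have : l = [] := by cases l <;> simp_all
    subst this
    simp [PySem.Chars.replace.go, pvRepl]
  | succ fuel ih =>
    intro l acc h
    match l with
    | [] => simp [PySem.Chars.replace.go, pvRepl]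
    | c :: rest =>
      rw [PySem.Chars.replace.go]
      by_cases hc : c = '%'
      · subst hc
        rw [if_pos (by simp [List.isPrefixOf])]
        rw [ih]
        · simp [pvRepl]
        · simp at h ⊢; omega
      · rw [if_neg (by simp [List.isPrefixOf]; exact fun hc' => absurd hc'.symm hc)]
        rw [ih]
        · simp [pvRepl, hc]
        · simp at h ⊢; omega

theorem pvSplitOn_eq (l : List Char) :
    PySem.Chars.splitOn l "{s}".toList = pvSplit l := by
  rw [PySem.Chars.splitOn, pvSplitOn_go_eq _ _ _ _ (by omega)]
  cases hms : pvSplit l with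
  | nil => exact absurd hms (pvSplit_ne_nil _)
  | cons p ps => simp [pvConsHead]

theorem pvReplace_eq (l : List Char) :
    PySem.Chars.replace l "%".toList "%%".toList = pvRepl l := by
  rw [PySem.Chars.replace, if_neg (by simp), pvReplace_go_eq _ _ _ (le_refl _)]
  simp

theorem pvJoin_consHead (x p : List Char) (ps : List (List Char)) :
    PySem.Chars.join "%s".toList ((x ++ p) :: ps)
      = x ++ PySem.Chars.join "%s".toList (p :: ps) := by
  cases ps with
  | nil => simp [PySem.Chars.join_singleton]
  | cons q qs => simp [PySem.Chars.join_cons_cons]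

theorem pvJoin_nil_cons (a : List Char) (as : List (List Char)) :
    PySem.Chars.join [] (a :: as) = a ++ PySem.Chars.join [] as := by
  cases as with
  | nil => simp [PySem.Chars.join_singleton, PySem.Chars.join_nil]
  | cons q qs => simp [PySem.Chars.join_cons_cons]

theorem pvReplHead (c : Char) (p : List Char) :
    pvRepl (c :: p) = (if c = '%' then ['%', '%'] else [c]) ++ pvRepl p := rfl

theorem pvMain (l : List Char) :
    PySem.Chars.join [] ((pvFA l).1.map String.toList)
      = PySem.Chars.join "%s".toList ((pvSplit l).map pvRepl)
    ∧ (pvFA l).2 = ((pvSplit l).length : Int) - 1 := by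
  induction l using pvFA.induct with
  | case1 => simp [pvFA, pvSplit, pvRepl, PySem.Chars.join_nil, PySem.Chars.join_singleton]
  | case2 c rest h ih =>
    obtain ⟨ih1, ih2⟩ := ih
    rw [pvFA, if_pos h, pvSplit, if_pos h]
    cases hms : pvSplit (rest.drop 2) with
    | nil => exact absurd hms (pvSplit_ne_nil _)
    | cons p ps =>
      rw [hms] at ih1 ih2
      constructor
      · simp only [List.map_cons]
        rw [pvJoin_nil_cons, ih1]
        show "%s".toList ++ _ = PySem.Chars.join "%s".toList (pvRepl [] :: pvRepl p :: ps.map pvRepl)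
        rw [show pvRepl [] = ([] : List Char) from rfl, PySem.Chars.join_cons_cons]
        simp
      · simp only [List.length_cons] at ih2 ⊢
        push_cast at ih2 ⊢
        omega
  | case3 c rest h ih =>
    obtain ⟨ih1, ih2⟩ := ih
    rw [pvFA, if_neg h, pvSplit, if_neg h]
    cases hms : pvSplit rest with
    | nil => exact absurd hms (pvSplit_ne_nil _)
    | cons p ps =>
      rw [hms] at ih1 ih2
      constructor
      · simp only [List.map_cons, pvConsHead]
        rw [pvJoin_nil_cons]
        rw [show ([c] ++ p : List Char) = c :: p from rfl, pvReplHead, pvJoin_consHead]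
        rw [show pvRepl p :: List.map pvRepl ps = List.map pvRepl (p :: ps) from rfl, ← ih1]
        by_cases hc : c = '%' <;> simp [hc]
      · simpa [pvConsHead] using ih2

-- ===== VERDICT (by name: the statement is the Claim_ definition above) =====
theorem to_printf_fmt_spec : Claim_equal_to_printf_fmt := by
  intro message _
  unfold Spec_to_printf_fmt to_printf_fmt to_printf_fmt_alt
  obtain ⟨h1, h2⟩ := pvMain message.toList
  rw [pvLoopA_eq]
  simp only [List.nil_append, Int.zero_add, pvSplitOn_eq]
  rw [h2]
  refine congrArg (fun s => (s, ((pvSplit message.toList).length : Int) - 1)) ?_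
  rw [PySem.Str.join]
  congr 1
  rw [show ("" : String).toList = [] from rfl, h1]
  exact congrArg _ (List.map_congr_left fun p _ => (pvReplace_eq p).symm)
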